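-- pv_equiv track=rewrite | github.com/Progern/computer-vision-hw | helpers/fast_brief.py | median_kernel_blur
-- ===== SOURCE A (Python) =====
-- def insert_sort(lst):
--     '''
--     Performs and insertion sort into the window
--     if values. Specific version for median kernel blur.
--     Inspired by Tibliu.
--     '''
--     for index in range(1, len(lst)):
--         currentvalue = lst[index]
--         position = index
--
--         while position > 0 and lst[position - 1] > currentvalue:
--             lst[position] = lst[position - 1]
--             position = position - 1
--
--         lst[position] = currentvalue
--
-- def median_kernel_blur(image, x0, y0, x1, y1, n = 3):
--     '''
--     Applies median blur on an image patch (x0, y0) - (x1,y1) to remove salt and pepper noise.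
--     Median blur replaces each pixel with the median of the NxN pixels surrounding it.
--
--     The salt and pepper noise is the main reason of bad corner detection.
--     '''
--
--     dst = image[:]
--     for y in range(x0, y0):
--         for x in range(x1, y1):
--             window = []
--             for i in range(y - n // 2, y + n // 2 + 1):
--                 for j in range(x - n//2, x + n//2 + 1):
--                     window.append(image[i][j])
--             insert_sort(window)
--             dst[y][x] = window[len(window)//2]
--
--     return dst
-- ===== SOURCE B (Python) =====
-- def _select(lst, k):
--     # k-th smallest element (0-based) by three-way-partition quickselect
--     while True:
--         pivot = lst[0]
--         lt = [v for v in lst if v < pivot]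
--         if k < len(lt):
--             lst = lt
--             continue
--         eq = 0
--         for v in lst:
--             if v == pivot:
--                 eq += 1
--         if k < len(lt) + eq:
--             return pivot
--         lst = [v for v in lst if v > pivot]
--         k -= len(lt) + eq
--
-- def median_kernel_blur(image, x0, y0, x1, y1, n = 3):
--     h = n // 2
--     dst = image[:]
--     for y in range(x0, y0):
--         for x in range(x1, y1):
--             window = [image[i][j]
--                       for i in range(y - h, y + h + 1)
--                       for j in range(x - h, x + h + 1)]
--             dst[y][x] = _select(window, len(window) // 2)
--     return dst
-- ===== Notes on version B (the rewrite author's own statement) =====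
-- stated objective: alternative
-- what changed: Replaces the per-pixel insertion sort of the whole NxN window by a three-way-partition quickselect that extracts only the middle order statistic, without ever sorting the window.
import Mathlib
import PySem

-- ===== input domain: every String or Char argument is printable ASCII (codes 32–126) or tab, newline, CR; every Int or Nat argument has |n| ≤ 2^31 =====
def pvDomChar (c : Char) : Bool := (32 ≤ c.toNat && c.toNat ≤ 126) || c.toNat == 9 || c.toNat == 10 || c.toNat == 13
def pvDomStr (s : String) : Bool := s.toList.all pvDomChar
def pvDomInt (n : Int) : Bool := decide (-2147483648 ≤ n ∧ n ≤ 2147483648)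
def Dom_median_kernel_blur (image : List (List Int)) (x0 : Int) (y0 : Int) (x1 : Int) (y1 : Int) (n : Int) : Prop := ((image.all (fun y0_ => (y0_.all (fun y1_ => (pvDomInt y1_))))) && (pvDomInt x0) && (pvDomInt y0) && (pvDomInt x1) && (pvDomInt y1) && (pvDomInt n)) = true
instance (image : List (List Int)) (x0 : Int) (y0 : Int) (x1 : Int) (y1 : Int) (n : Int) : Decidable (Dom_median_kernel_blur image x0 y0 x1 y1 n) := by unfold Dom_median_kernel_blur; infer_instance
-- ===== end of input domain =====

-- B replaces A's per-pixel insertion sort of the window by a three-way-partition quickselect of the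
-- window's middle order statistic (no sorting).  Both A and B mutate the rows of `image` in place in
-- the same way (A's `dst = image[:]` shares the rows); the ports thread that single mutable state.

-- ===== PORT A =====
-- the inner `while position > 0 and lst[position-1] > currentvalue` loop of insert_sort;
-- `position` is a nonnegative index, so `lst[position] = v` is List.set (PySem.List.pySetD_natCast)
def pvWhileA (lst : List Int) (cur : Int) : Nat → List Int
  | 0 => lst.set 0 cur
  | pos + 1 =>
    if PySem.List.pyGetD lst (pos : Int) 0 > cur then
      pvWhileA (lst.set (pos + 1) (PySem.List.pyGetD lst (pos : Int) 0)) cur pos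
    else lst.set (pos + 1) cur

-- insert_sort: `for index in range(1, len(lst))`
def insertSortA (lst : List Int) : List Int :=
  (PySem.List.pyRange 1 lst.length 1).foldl
    (fun l index => pvWhileA l (PySem.List.pyGetD l index 0) index.toNat) lst

-- the window-gathering double loop with `window.append(image[i][j])`
def windowA (img : List (List Int)) (y x h : Int) : List Int :=
  (PySem.List.pyRange (y - h) (y + h + 1) 1).foldl (fun w i =>
    (PySem.List.pyRange (x - h) (x + h + 1) 1).foldl (fun w j =>
      w ++ [PySem.List.pyGetD (PySem.List.pyGetD img i []) j 0]) w) []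

-- dst[y][x] = v  (python indexing, possibly negative)
def pvSet2 (img : List (List Int)) (y x : Int) (v : Int) : List (List Int) :=
  PySem.List.pySetD img y (PySem.List.pySetD (PySem.List.pyGetD img y []) x v)

def median_kernel_blur (image : List (List Int)) (x0 : Int) (y0 : Int) (x1 : Int) (y1 : Int) (n : Int) : List (List Int) :=
  -- `dst = image[:]` shares the row objects with `image`, so `dst[y][x] = v` is seen by the
  -- subsequent reads of `image[i][j]`: one threaded state models both names
  (PySem.List.pyRange x0 y0 1).foldl (fun img y =>
    (PySem.List.pyRange x1 y1 1).foldl (fun img x =>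
      let window := windowA img y x (PySem.Int.floordiv n 2)
      let w := insertSortA window
      pvSet2 img y x (PySem.List.pyGetD w ((w.length / 2 : Nat) : Int) 0)) img) image

-- ===== PORT B =====
-- _select: the `while True` loop becomes tail recursion; `lst[0]` on the empty list is an
-- IndexError in Python (excluded by Pre_), here the unreachable default 0
def pvSelect (lst : List Int) (k : Nat) : Int :=
  match lst with
  | [] => 0
  | pivot :: rest =>
    let lt := (pivot :: rest).filter (fun v => decide (v < pivot))
    if k < lt.length then pvSelect lt k
    else
      let eqc := (pivot :: rest).countP (fun v => v == pivot)
      if k < lt.length + eqc then pivot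
      else pvSelect ((pivot :: rest).filter (fun v => decide (pivot < v))) (k - (lt.length + eqc))
termination_by lst.length
decreasing_by
  · simp only [List.filter_cons, decide_eq_true_eq, lt_irrefl, if_false, List.length_cons]
    exact Nat.lt_succ_of_le (List.length_filter_le _ _)
  · simp only [List.filter_cons, decide_eq_true_eq, lt_irrefl, if_false, List.length_cons]
    exact Nat.lt_succ_of_le (List.length_filter_le _ _)

-- the window list comprehension
def windowB (img : List (List Int)) (y x h : Int) : List Int :=
  (PySem.List.pyRange (y - h) (y + h + 1) 1).flatMap (fun i =>
    (PySem.List.pyRange (x - h) (x + h + 1) 1).map (fun j =>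
      PySem.List.pyGetD (PySem.List.pyGetD img i []) j 0))

def median_kernel_blur_alt (image : List (List Int)) (x0 : Int) (y0 : Int) (x1 : Int) (y1 : Int) (n : Int) : List (List Int) :=
  (PySem.List.pyRange x0 y0 1).foldl (fun img y =>
    (PySem.List.pyRange x1 y1 1).foldl (fun img x =>
      let window := windowB img y x (PySem.Int.floordiv n 2)
      pvSet2 img y x (pvSelect window (window.length / 2))) img) image

-- ===== PRECONDITION & SPEC =====
-- Pre_ excludes exactly the inputs on which the Python A raises: a blurred pixel (y, x) whose
-- window is empty (n < 0, so `window[len(window)//2]` is an IndexError) or for which some read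
-- `image[i][j]` or the write `dst[y][x]` is out of range (IndexError).
def Pre_median_kernel_blur (image : List (List Int)) (x0 : Int) (y0 : Int) (x1 : Int) (y1 : Int) (n : Int) : Prop :=
  x0 < y0 ∧ x1 < y1 →
    0 ≤ n ∧
    PySem.Raise.InRange image.length (x0 - PySem.Int.floordiv n 2) ∧
    PySem.Raise.InRange image.length (y0 - 1 + PySem.Int.floordiv n 2) ∧
    ∀ kr ∈ image.zipIdx,
      ((x0 - PySem.Int.floordiv n 2 ≤ (kr.2 : Int) ∧ (kr.2 : Int) ≤ y0 - 1 + PySem.Int.floordiv n 2)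
        ∨ (x0 - PySem.Int.floordiv n 2 ≤ (kr.2 : Int) - image.length ∧
           (kr.2 : Int) - image.length ≤ y0 - 1 + PySem.Int.floordiv n 2)) →
      PySem.Raise.InRange kr.1.length (x1 - PySem.Int.floordiv n 2) ∧
      PySem.Raise.InRange kr.1.length (y1 - 1 + PySem.Int.floordiv n 2)

instance (image : List (List Int)) (x0 : Int) (y0 : Int) (x1 : Int) (y1 : Int) (n : Int) : Decidable (Pre_median_kernel_blur image x0 y0 x1 y1 n) := by unfold Pre_median_kernel_blur; infer_instance

def pvWitness_median_kernel_blur : List (List Int) × Int × Int × Int × Int × Int :=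
  ([[1, 2], [3, 4]], 0, 2, 0, 2, 1)

def Spec_median_kernel_blur (image : List (List Int)) (x0 : Int) (y0 : Int) (x1 : Int) (y1 : Int) (n : Int) (out : List (List Int)) : Prop := out = median_kernel_blur_alt image x0 y0 x1 y1 n
instance (image : List (List Int)) (x0 : Int) (y0 : Int) (x1 : Int) (y1 : Int) (n : Int) (out : List (List Int)) : Decidable (Spec_median_kernel_blur image x0 y0 x1 y1 n out) := by unfold Spec_median_kernel_blur; infer_instance

-- ===== CLAIM (what is proved, stated in full; the proofs are below) =====
def Claim_equal_median_kernel_blur : Prop := ∀ (image : List (List Int)) (x0 : Int) (y0 : Int) (x1 : Int) (y1 : Int) (n : Int), Dom_median_kernel_blur image x0 y0 x1 y1 n → Pre_median_kernel_blur image x0 y0 x1 y1 n → Spec_median_kernel_blur image x0 y0 x1 y1 n (median_kernel_blur image x0 y0 x1 y1 n)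

-- ===== LEMMAS AND PROOFS =====

-- ---- ordered insertion (the effect of pvWhileA on a sorted prefix) ----
def pvIns : List Int → Int → List Int
  | [], c => [c]
  | x :: xs, c => if c < x then c :: x :: xs else x :: pvIns xs c

theorem pvIns_perm (l : List Int) (c : Int) : (pvIns l c).Perm (c :: l) := by
  induction l with
  | nil => simp [pvIns]
  | cons x xs ih =>
    by_cases h : c < x
    · simp [pvIns, h]
    · simp only [pvIns, h, if_false]
      exact (ih.cons x).trans (List.Perm.swap c x xs)

theorem pvIns_mem {l : List Int} {c v : Int} (h : v ∈ pvIns l c) : v = c ∨ v ∈ l := by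
  have := (pvIns_perm l c).mem_iff.mp h
  simpa using this

theorem pvIns_pairwise {l : List Int} (hl : l.Pairwise (· ≤ ·)) (c : Int) :
    (pvIns l c).Pairwise (· ≤ ·) := by
  induction l with
  | nil => simp [pvIns]
  | cons x xs ih =>
    rcases List.pairwise_cons.mp hl with ⟨hx, hxs⟩
    by_cases h : c < x
    · simp only [pvIns, if_pos h]
      refine List.pairwise_cons.mpr ⟨?_, hl⟩
      intro b hb
      rcases List.mem_cons.mp hb with rfl | hb
      · exact le_of_lt h
      · exact le_trans (le_of_lt h) (hx _ hb)
    · simp only [pvIns, h, if_false]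
      refine List.pairwise_cons.mpr ⟨?_, ih hxs⟩
      intro b hb
      rcases pvIns_mem hb with rfl | hb
      · exact le_of_not_gt h
      · exact hx _ hb

theorem pvIns_append_of_lt (q : List Int) (a c : Int) (h : c < a) :
    pvIns (q ++ [a]) c = pvIns q c ++ [a] := by
  induction q with
  | nil => simp [pvIns, h]
  | cons x xs ih =>
    by_cases hx : c < x
    · simp [pvIns, hx]
    · simp [pvIns, hx, ih]

theorem pvIns_append_of_all_le (l : List Int) (c : Int) (h : ∀ x ∈ l, ¬ c < x) :
    pvIns l c = l ++ [c] := by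
  induction l with
  | nil => simp [pvIns]
  | cons x xs ih =>
    have hx := h x (by simp)
    simp only [pvIns, hx, if_false, List.cons_append, List.cons.injEq, true_and]
    exact ih (fun y hy => h y (by simp [hy]))

-- ---- getD / set on a split list ----
theorem getD_append_cons (q : List Int) (a : Int) (t : List Int) (d : Int) :
    (q ++ a :: t).getD q.length d = a := by
  induction q with
  | nil => rfl
  | cons x xs _ => simp

theorem set_append_cons_cons (q : List Int) (a b v : Int) (t : List Int) :
    (q ++ a :: b :: t).set (q.length + 1) v = q ++ a :: v :: t := by
  induction q with
  | nil => rfl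
  | cons x xs ih => simp [ih]

-- ---- pvWhileA inserts into a sorted prefix ----
theorem pvWhileA_spec (p : List Int) (junk : Int) (r : List Int) (cur : Int)
    (hp : p.Pairwise (· ≤ ·)) :
    pvWhileA (p ++ junk :: r) cur p.length = pvIns p cur ++ r := by
  induction p using List.reverseRecOn generalizing junk r with
  | nil => simp [pvWhileA, pvIns]
  | append_singleton q a ih =>
    have hq : q.Pairwise (· ≤ ·) := (List.pairwise_append.mp hp).1
    have hqa : ∀ x ∈ q, x ≤ a := by
      intro x hx
      exact (List.pairwise_append.mp hp).2.2 x hx a (by simp)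
    have hlen : (q ++ [a]).length = q.length + 1 := by simp
    have hget : PySem.List.pyGetD ((q ++ [a]) ++ junk :: r) ((q.length : Nat) : Int) 0 = a := by
      rw [PySem.List.pyGetD_natCast]
      simp only [List.append_assoc, List.cons_append]; exact getD_append_cons q a (junk :: r) 0
    rw [hlen]
    show (if PySem.List.pyGetD ((q ++ [a]) ++ junk :: r) ((q.length : Nat) : Int) 0 > cur then
        pvWhileA (((q ++ [a]) ++ junk :: r).set (q.length + 1)
          (PySem.List.pyGetD ((q ++ [a]) ++ junk :: r) ((q.length : Nat) : Int) 0)) cur q.length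
      else ((q ++ [a]) ++ junk :: r).set (q.length + 1) cur) = pvIns (q ++ [a]) cur ++ r
    rw [hget]
    by_cases hcmp : a > cur
    · rw [if_pos hcmp]
      have hset : ((q ++ [a]) ++ junk :: r).set (q.length + 1) a = q ++ a :: a :: r := by
        simp only [List.append_assoc, List.cons_append]; exact set_append_cons_cons q a junk a r
      rw [hset, ih a (a :: r) hq, pvIns_append_of_lt q a cur hcmp]
      simp
    · rw [if_neg hcmp]
      have hset : ((q ++ [a]) ++ junk :: r).set (q.length + 1) cur = q ++ a :: cur :: r := by
        simp only [List.append_assoc, List.cons_append]; exact set_append_cons_cons q a junk cur r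
      rw [hset, pvIns_append_of_all_le (q ++ [a]) cur ?_]
      · simp
      · intro x hx
        rcases List.mem_append.mp hx with hx | hx
        · have h1 : x ≤ a := hqa x hx
          have h2 : ¬ cur < a := hcmp
          omega
        · simp at hx; subst hx; exact hcmp

-- ---- insertion sort as a left fold of pvIns ----
def pvIsort (l : List Int) : List Int := l.foldl pvIns []

theorem foldl_pvIns_perm (l acc : List Int) : (l.foldl pvIns acc).Perm (acc ++ l) := by
  induction l generalizing acc with
  | nil => simp
  | cons x xs ih =>
    simp only [List.foldl_cons]
    exact (ih (pvIns acc x)).trans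
      (((pvIns_perm acc x).append_right xs).trans List.perm_middle.symm)

theorem pvIsort_perm (l : List Int) : (pvIsort l).Perm l := by
  simpa using foldl_pvIns_perm l []

theorem foldl_pvIns_pairwise (l : List Int) : ∀ acc : List Int, acc.Pairwise (· ≤ ·) →
    (l.foldl pvIns acc).Pairwise (· ≤ ·) := by
  induction l with
  | nil => intro acc h; simpa using h
  | cons x xs ih => intro acc h; exact ih _ (pvIns_pairwise h x)

theorem pvIsort_pairwise (l : List Int) : (pvIsort l).Pairwise (· ≤ ·) :=
  foldl_pvIns_pairwise l [] (by simp)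

theorem pvIsort_length (l : List Int) : (pvIsort l).length = l.length :=
  (pvIsort_perm l).length_eq

theorem pvIsort_append (l : List Int) (a : Int) :
    pvIsort (l ++ [a]) = pvIns (pvIsort l) a := by
  simp [pvIsort]

-- ---- insertSortA computes pvIsort ----
theorem insertSortA_loop (l : List Int) (m : Nat) (hm : m + 1 ≤ l.length) :
    (List.range m).foldl
      (fun (st : List Int) (k : Nat) =>
        pvWhileA st (PySem.List.pyGetD st (1 + (k : Int)) 0) (1 + (k : Int)).toNat) l
      = pvIsort (l.take (m + 1)) ++ l.drop (m + 1) := by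
  induction m with
  | zero =>
    rcases l with _ | ⟨a, t⟩
    · simp at hm
    · simp [pvIsort, pvIns]
  | succ m ih =>
    have hm' : m + 1 ≤ l.length := by omega
    have hlt : m + 1 < l.length := by omega
    rw [List.range_succ, List.foldl_append, ih hm']
    obtain ⟨v, hv⟩ : ∃ v, l[m + 1] = v := ⟨l[m + 1], rfl⟩
    have hdrop : l.drop (m + 1) = v :: l.drop (m + 2) := by
      rw [List.drop_eq_getElem_cons hlt, hv]
    have hPlen : (pvIsort (l.take (m + 1))).length = m + 1 := by
      rw [pvIsort_length, List.length_take]; omega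
    have hcast : (1 + ((m : Nat) : Int)) = (((m + 1 : Nat) : Int)) := by push_cast; ring
    simp only [List.foldl_cons, List.foldl_nil]
    rw [hdrop, hcast, PySem.List.pyGetD_natCast]
    have hget := getD_append_cons (pvIsort (l.take (m + 1))) v (l.drop (m + 2)) 0
    rw [hPlen] at hget
    rw [hget]
    have htoNat : (((m + 1 : Nat) : Int)).toNat = m + 1 := by simp
    rw [htoNat]
    have hmain := pvWhileA_spec (pvIsort (l.take (m + 1))) v (l.drop (m + 2)) v
      (pvIsort_pairwise _)
    rw [hPlen] at hmain
    rw [hmain]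
    have htake : l.take (m + 2) = l.take (m + 1) ++ [v] := by
      rw [← hv, List.take_concat_get' l (m+1) hlt]
    rw [htake, pvIsort_append]

theorem insertSortA_eq_pvIsort (l : List Int) : insertSortA l = pvIsort l := by
  rcases l with _ | ⟨a, t⟩
  · simp [insertSortA, pvIsort, PySem.List.pyRange]
  · unfold insertSortA
    rw [PySem.List.pyRange_one, List.foldl_map]
    have hlen : (((a :: t).length : Int) - 1).toNat = t.length := by simp
    rw [hlen]
    have h := insertSortA_loop (a :: t) t.length (by simp)
    rw [h]
    simp

theorem insertSortA_eq_sorted (l : List Int) :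
    insertSortA l = PySem.List.sorted l (fun v => v) false := by
  rw [insertSortA_eq_pvIsort]
  exact (PySem.List.sorted_id_eq_of_perm_of_pairwise l (pvIsort l) (pvIsort_perm l)
    (pvIsort_pairwise l)).symm

-- ---- three-way partition of the sorted list ----
theorem partition3_perm (l : List Int) (pivot : Int) :
    (l.filter (fun v => decide (v < pivot)) ++ l.filter (fun v => v == pivot)
      ++ l.filter (fun v => decide (pivot < v))).Perm l := by
  induction l with
  | nil => simp
  | cons a t ih =>
    simp only [List.filter_cons, decide_eq_true_eq, beq_iff_eq]
    rcases lt_trichotomy a pivot with h | h | h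
    · rw [if_pos h, if_neg (by omega), if_neg (by omega)]
      exact ih.cons a
    · subst h
      rw [if_neg (lt_irrefl a), if_pos rfl, if_neg (lt_irrefl a)]
      have hassoc : (t.filter (fun v => decide (v < a)) ++ a :: t.filter (fun v => v == a))
            ++ t.filter (fun v => decide (a < v))
          = t.filter (fun v => decide (v < a)) ++ a :: (t.filter (fun v => v == a)
            ++ t.filter (fun v => decide (a < v))) := by simp
      rw [hassoc]
      refine List.perm_middle.trans (List.Perm.cons a ?_)
      rw [← List.append_assoc]
      exact ih
    · rw [if_neg (by omega), if_neg (by omega), if_pos h]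
      exact List.perm_middle.trans (ih.cons a)

theorem filter_eq_replicate_countP (l : List Int) (pivot : Int) :
    l.filter (fun v => v == pivot) = List.replicate (l.countP (fun v => v == pivot)) pivot := by
  induction l with
  | nil => simp
  | cons a t ih =>
    by_cases h : a = pivot
    · subst h; simp [List.replicate_succ, ih]
    · simp [h, ih]

theorem sorted_partition3 (l : List Int) (pivot : Int) :
    PySem.List.sorted l (fun v => v) false
      = PySem.List.sorted (l.filter (fun v => decide (v < pivot))) (fun v => v) false
        ++ List.replicate (l.countP (fun v => v == pivot)) pivot
        ++ PySem.List.sorted (l.filter (fun v => decide (pivot < v))) (fun v => v) false := by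
  apply PySem.List.sorted_id_eq_of_perm_of_pairwise
  · refine (List.Perm.append (List.Perm.append (PySem.List.sorted_perm _ _ _)
      (List.Perm.refl _)) (PySem.List.sorted_perm _ _ _)).trans ?_
    rw [← filter_eq_replicate_countP]
    exact partition3_perm l pivot
  · have hlt : ∀ v ∈ PySem.List.sorted (l.filter (fun v => decide (v < pivot))) (fun v => v) false,
        v < pivot := by
      intro v hv
      have := (PySem.List.mem_sorted _ _ _ _).mp hv
      simpa using List.of_mem_filter this
    have hgt : ∀ v ∈ PySem.List.sorted (l.filter (fun v => decide (pivot < v))) (fun v => v) false,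
        pivot < v := by
      intro v hv
      have := (PySem.List.mem_sorted _ _ _ _).mp hv
      simpa using List.of_mem_filter this
    rw [List.append_assoc, List.pairwise_append]
    refine ⟨?_, ?_, ?_⟩
    · have := PySem.List.sorted_pairwise (l.filter (fun v => decide (v < pivot))) (fun v : Int => v)
      simpa using this
    · rw [List.pairwise_append]
      refine ⟨List.pairwise_replicate.mpr (by simp), ?_, ?_⟩
      · have := PySem.List.sorted_pairwise (l.filter (fun v => decide (pivot < v))) (fun v : Int => v)
        simpa using this
      · intro a ha b hb
        have ha' : a = pivot := List.eq_of_mem_replicate ha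
        exact le_of_lt (ha' ▸ hgt b hb)
    · intro a ha b hb
      rcases List.mem_append.mp hb with hb | hb
      · exact le_of_lt (lt_of_lt_of_le (hlt a ha) (List.eq_of_mem_replicate hb).ge)
      · exact le_of_lt (lt_trans (hlt a ha) (hgt b hb))

theorem pvSelect_eq_sorted : ∀ (N : Nat) (l : List Int) (k : Nat), l.length ≤ N →
    k < l.length → pvSelect l k = (PySem.List.sorted l (fun v => v) false).getD k 0 := by
  intro N
  induction N with
  | zero => intro l k h1 h2; omega
  | succ N ih =>
    intro l k h1 h2
    rcases l with _ | ⟨pivot, rest⟩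
    · simp at h2
    · rw [pvSelect]
      set lt := (pivot :: rest).filter (fun v => decide (v < pivot)) with hlt
      set eqc := (pivot :: rest).countP (fun v => v == pivot) with heqc
      set gt := (pivot :: rest).filter (fun v => decide (pivot < v)) with hgt
      have hrepl : (pivot :: rest).filter (fun v => v == pivot) = List.replicate eqc pivot :=
        filter_eq_replicate_countP (pivot :: rest) pivot
      have hlen : lt.length + eqc + gt.length = (pivot :: rest).length := by
        have hp := (partition3_perm (pivot :: rest) pivot).length_eq
        rw [hrepl] at hp
        rw [← hlt, ← hgt] at hp
        simp only [List.length_append, List.length_replicate, List.length_cons] at hp ⊢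
        omega
      have hdecomp := sorted_partition3 (pivot :: rest) pivot
      rw [← hlt, ← hgt, ← heqc] at hdecomp
      have hltlen : lt.length < (pivot :: rest).length := by
        rw [hlt]
        simp only [List.filter_cons, decide_eq_true_eq, lt_irrefl, if_false, List.length_cons]
        exact Nat.lt_succ_of_le (List.length_filter_le _ _)
      have hS1 : (PySem.List.sorted lt (fun v => v) false).length = lt.length :=
        PySem.List.length_sorted _ _ _
      have hS3 : (PySem.List.sorted gt (fun v => v) false).length = gt.length :=
        PySem.List.length_sorted _ _ _
      have heqc1 : 0 < eqc := by rw [heqc]; simp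
      simp only [List.length_cons] at h1 h2 hlen hltlen
      by_cases hk1 : k < lt.length
      · rw [if_pos hk1, hdecomp]
        rw [List.append_assoc, List.getD_append _ _ _ _ (by omega)]
        exact ih lt k (by omega) hk1
      · rw [if_neg hk1]
        by_cases hk2 : k < lt.length + eqc
        · rw [if_pos hk2, hdecomp]
          rw [List.append_assoc, List.getD_append_right _ _ _ _ (by rw [hS1]; omega),
            List.getD_append _ _ _ _ (by rw [hS1, List.length_replicate]; omega)]
          rw [List.getD_eq_getElem _ _ (by rw [hS1, List.length_replicate]; omega)]
          simp
        · rw [if_neg hk2, hdecomp]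
          rw [List.append_assoc, List.getD_append_right _ _ _ _ (by rw [hS1]; omega),
            List.getD_append_right _ _ _ _ (by rw [hS1, List.length_replicate]; omega)]
          have harith : k - (PySem.List.sorted lt (fun v => v) false).length
              - (List.replicate eqc pivot).length = k - (lt.length + eqc) := by
            rw [hS1, List.length_replicate]; omega
          rw [harith]
          exact ih gt (k - (lt.length + eqc)) (by omega) (by omega)

-- ---- the two window computations agree ----
theorem foldl_append_singleton {α : Type} (l : List α) (f : α → Int) :
    ∀ w : List Int, l.foldl (fun w j => w ++ [f j]) w = w ++ l.map f := by
  induction l with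
  | nil => intro w; simp
  | cons a t ih => intro w; simp [ih]

theorem foldl_append_chunks {α : Type} (l : List α) (g : α → List Int) :
    ∀ w : List Int, l.foldl (fun w i => w ++ g i) w = w ++ l.flatMap g := by
  induction l with
  | nil => intro w; simp
  | cons a t ih => intro w; simp [ih]

theorem window_eq (img : List (List Int)) (y x h : Int) :
    windowA img y x h = windowB img y x h := by
  unfold windowA windowB
  have hinner : ∀ (i : Int) (w : List Int),
      (PySem.List.pyRange (x - h) (x + h + 1) 1).foldl
        (fun w j => w ++ [PySem.List.pyGetD (PySem.List.pyGetD img i []) j 0]) w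
        = w ++ (PySem.List.pyRange (x - h) (x + h + 1) 1).map
            (fun j => PySem.List.pyGetD (PySem.List.pyGetD img i []) j 0) := by
    intro i w
    exact foldl_append_singleton _ _ w
  calc (PySem.List.pyRange (y - h) (y + h + 1) 1).foldl (fun w i =>
        (PySem.List.pyRange (x - h) (x + h + 1) 1).foldl
          (fun w j => w ++ [PySem.List.pyGetD (PySem.List.pyGetD img i []) j 0]) w) []
      = (PySem.List.pyRange (y - h) (y + h + 1) 1).foldl (fun w i =>
          w ++ (PySem.List.pyRange (x - h) (x + h + 1) 1).map
            (fun j => PySem.List.pyGetD (PySem.List.pyGetD img i []) j 0)) [] := by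
        apply List.foldl_ext
        intro w i _
        exact hinner i w
    _ = _ := by
        rw [foldl_append_chunks]
        simp

-- ---- the two per-pixel medians agree ----
theorem median_pixel_eq (img : List (List Int)) (y x h : Int) :
    PySem.List.pyGetD (insertSortA (windowA img y x h))
        (((insertSortA (windowA img y x h)).length / 2 : Nat) : Int) 0
      = pvSelect (windowB img y x h) ((windowB img y x h).length / 2) := by
  rw [window_eq, insertSortA_eq_sorted, PySem.List.pyGetD_natCast, PySem.List.length_sorted]
  generalize windowB img y x h = w
  rcases w with _ | ⟨a, t⟩
  · simp [pvSelect, PySem.List.sorted]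
  · have hpos : 0 < (a :: t).length := by simp
    have hk : (a :: t).length / 2 < (a :: t).length := Nat.div_lt_self hpos (by norm_num)
    rw [pvSelect_eq_sorted (a :: t).length (a :: t) ((a :: t).length / 2) le_rfl hk]

-- ===== VERDICT (by name: the statement is the Claim_ definition above) =====
theorem median_kernel_blur_spec : Claim_equal_median_kernel_blur := by
  intro image x0 y0 x1 y1 n _ _
  unfold Spec_median_kernel_blur median_kernel_blur median_kernel_blur_alt
  apply List.foldl_ext
  intro img y _
  apply List.foldl_ext
  intro img' x _
  show pvSet2 img' y x _ = pvSet2 img' y x _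
  rw [median_pixel_eq]
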